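-- pv_equiv track=rewrite | github.com/KS-Limmattal/Python-2023-24 | solutions/uebung-4/bonus.py | permute_letters
-- ===== SOURCE A (Python) =====
-- def permute_letters(content, alphabet, permutation):
--     # Permutiere die Buchstaben gemäss der Permutation
--     permutation_upper = [letter.upper() for letter in permutation]
--
--     # Im kleingeschriebenen Text, ersetze alle Buchstaben durch die permutierten Grossbuchstaben
--     content_permuted = content.lower()
--     for i, letter in enumerate(alphabet):
--         content_permuted = content_permuted.replace(letter, permutation_upper[i])
--
--     # Buchstaben, die original gross geschrieben waren, sollen gross sein; alle anderen klein
--     temp = list(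
--         content_permuted.lower()
--     )  # Listeintrag zu ändern ist einfacher als Zeichenketteneintrag
--     for i in range(len(content_permuted)):
--         if content[i].isupper():
--             temp[i] = content_permuted[i].upper()
--     content_permuted = "".join(temp)  # Mache aus der Liste wieder eine Zeichenkette
--     return content_permuted
-- ===== SOURCE B (Python) =====
-- def permute_letters(content, alphabet, permutation):
--     # One mapping table (first occurrence wins), then a single pass over content.
--     table = {}
--     for i, letter in enumerate(alphabet):
--         target = permutation[i]
--         if letter not in table:
--             table[letter] = target
--     result = ""
--     for c in content:
--         m = table.get(c.lower())
--         if m is None: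
--             result += c
--         else:
--             result += m.upper() if c.isupper() else m.lower()
--     return result
-- ===== Notes on version B (the rewrite author's own statement) =====
-- stated objective: faster
-- what changed: A runs one full-string replace pass per alphabet letter over the lowered text and then two more passes to lower and re-uppercase by original casing; B builds one first-wins letter-to-letter table and maps each character of content in a single pass, restoring its original case on the spot.
-- outside the precondition, e.g. on permute_letters('ab', ['ab'], ['x']): A returns 'x', B returns 'ab'; on permute_letters('a', ['a', '3'], ['3', 'x']): A returns 'x', B returns '3'; on permute_letters('Ab', ['a'], ['']): A returns 'B', B returns 'b'
import Mathlib
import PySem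

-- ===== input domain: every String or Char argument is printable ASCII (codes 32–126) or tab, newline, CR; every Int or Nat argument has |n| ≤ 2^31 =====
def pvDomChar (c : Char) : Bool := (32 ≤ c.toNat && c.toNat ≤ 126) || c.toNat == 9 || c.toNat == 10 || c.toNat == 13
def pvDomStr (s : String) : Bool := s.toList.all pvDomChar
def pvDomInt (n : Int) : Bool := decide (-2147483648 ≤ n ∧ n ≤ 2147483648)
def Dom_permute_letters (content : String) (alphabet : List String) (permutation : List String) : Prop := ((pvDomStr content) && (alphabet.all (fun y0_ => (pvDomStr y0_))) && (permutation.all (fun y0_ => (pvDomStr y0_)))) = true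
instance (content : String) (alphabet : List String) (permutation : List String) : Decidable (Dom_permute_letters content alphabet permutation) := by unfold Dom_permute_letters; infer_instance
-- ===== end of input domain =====

-- B replaces A's |alphabet| whole-string replace passes and the separate lower/re-upper passes by one
-- first-wins mapping table plus a single pass over content (alternative decomposition; also faster at scale).

-- ===== PORT A =====
def permute_letters (content : String) (alphabet : List String) (permutation : List String) : String :=
  let permutation_upper := permutation.map PySem.Str.upper
  let content_permuted :=
    (PySem.List.enumerate alphabet).foldl
      (fun cp p => PySem.Str.replace cp p.2 (PySem.List.pyGetD permutation_upper p.1 ""))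
      (PySem.Str.lower content)
  let temp0 := (PySem.Str.lower content_permuted).toList
  let temp :=
    (PySem.List.pyRange 0 (PySem.Str.len content_permuted)).foldl
      (fun t i =>
        if PySem.Chars.isupper (PySem.List.pyGetD content.toList i ' ') then
          t.set i.toNat (PySem.Chars.upperChar (PySem.List.pyGetD content_permuted.toList i ' '))
        else t)
      temp0
  String.ofList temp

-- ===== PORT B =====
def permute_letters_alt (content : String) (alphabet : List String) (permutation : List String) : String :=
  let table : PySem.Dict String String :=
    (PySem.List.enumerate alphabet).foldl
      (fun d p =>
        let target := PySem.List.pyGetD permutation p.1 ""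
        if d.contains p.2 then d else d.insert p.2 target)
      PySem.Dict.empty
  let result :=
    content.toList.foldl
      (fun acc c =>
        match table.get? (String.ofList [PySem.Chars.lowerChar c]) with
        | none => acc ++ [c]
        | some m => acc ++ (if PySem.Chars.isupper c then PySem.Str.upper m else PySem.Str.lower m).toList)
      []
  String.ofList result

-- ===== PRECONDITION & SPEC =====
-- vocabulary used by Pre_: the lowered content, the single-letter pairs, and the chars they insert
def pvW (content : String) : List Char := PySem.Chars.lower content.toList
def pvSingleQ (p : String × String) : Bool := p.1.toList.length == 1 && p.2.toList.length == 1
def pvRawPairs (ps : List (String × String)) : List (Char × Char) :=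
  (ps.filter pvSingleQ).map (fun p => (p.1.toList.headD ' ', p.2.toList.headD ' '))
def pvPairs (al pm : List String) : List (Char × Char) := pvRawPairs (al.zip pm)
def pvUS (al pm : List String) : List Char :=
  (pvPairs al pm).map (fun q => PySem.Chars.upperChar q.2)

-- Pre_ keeps the inputs on which A's pipeline of whole-string replaces acts as one per-letter
-- substitution: the permutation is long enough, and each (alphabet, permutation) pair is either a
-- single-char pair whose letter is not itself an inserted uppercase char (no cascades), or a pair
-- that provably never fires (some char of the alphabet entry occurs neither in the lowered content
-- nor among the inserted chars, or both entries are empty); outside it A's sequential replaces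
-- cascade through each other or change the string's length, so A's value there (or its IndexError)
-- is an artefact of replace order, not of a letter permutation.
def Pre_permute_letters (content : String) (alphabet : List String) (permutation : List String) : Prop :=
  alphabet.length ≤ permutation.length ∧
  (alphabet.zip permutation).all (fun p =>
    (pvSingleQ p && !((pvUS alphabet permutation).contains (p.1.toList.headD ' ')))
    || p.1.toList.any (fun c =>
        !((pvW content).contains c) && !((pvUS alphabet permutation).contains c))
    || (p.1 == "" && p.2 == "")) = true
instance (content : String) (alphabet : List String) (permutation : List String) : Decidable (Pre_permute_letters content alphabet permutation) := by unfold Pre_permute_letters; infer_instance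

def pvWitness_permute_letters : String × List String × List String := ("Ab c!", ["a", "b"], ["z", "y"])

def Spec_permute_letters (content : String) (alphabet : List String) (permutation : List String) (out : String) : Prop := out = permute_letters_alt content alphabet permutation
instance (content : String) (alphabet : List String) (permutation : List String) (out : String) : Decidable (Spec_permute_letters content alphabet permutation out) := by unfold Spec_permute_letters; infer_instance

-- ===== CLAIM (what is proved, stated in full; the proofs are below) =====
def Claim_equal_permute_letters : Prop := ∀ (content : String) (alphabet : List String) (permutation : List String), Dom_permute_letters content alphabet permutation → Pre_permute_letters content alphabet permutation → Spec_permute_letters content alphabet permutation (permute_letters content alphabet permutation)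

-- ===== LEMMAS AND PROOFS =====

-- a pair that Pre_ admits: single/single, never-firing, or empty/empty
def pvGoodPair (V : List Char) (p : String × String) : Prop :=
  (p.1.toList.length = 1 ∧ p.2.toList.length = 1) ∨ (∃ c ∈ p.1.toList, c ∉ V) ∨ (p.1 = "" ∧ p.2 = "")

-- sequential per-pair substitution of a single char (the composite of A's replace passes)
def pvSubstSeq : List (Char × Char) → Char → Char
  | [], c => c
  | p :: t, c => pvSubstSeq t (if c = p.1 then p.2 else c)

-- first-match lookup on char pairs
def pvLookup : List (Char × Char) → Char → Option Char
  | [], _ => none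
  | p :: t, c => if c = p.1 then some p.2 else pvLookup t c

-- first-match lookup on string pairs (B's dict)
def pvAssoc : List (String × String) → String → Option String
  | [], _ => none
  | p :: t, k => if k = p.1 then some p.2 else pvAssoc t k

-- the single-char mapping both programs implement
def pvPhi (al pm : List String) (c : Char) : Char :=
  match pvLookup (pvPairs al pm) (PySem.Chars.lowerChar c) with
  | none => c
  | some b => if PySem.Chars.isupper c then PySem.Chars.upperChar b else PySem.Chars.lowerChar b

theorem pv_chle (a b : Char) : (a ≤ b) ↔ a.toNat ≤ b.toNat := by
  rw [Char.le_def, UInt32.le_iff_toNat_le]; rfl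
theorem pv_char_eq {a b : Char} (h : a.toNat = b.toNat) : a = b := by
  have := congrArg Char.ofNat h
  rwa [Char.ofNat_toNat, Char.ofNat_toNat] at this
theorem pv_isupper_iff (c : Char) : PySem.Chars.isupper c = true ↔ 65 ≤ c.toNat ∧ c.toNat ≤ 90 := by
  have hA : ('A':Char).toNat = 65 := rfl
  have hZ : ('Z':Char).toNat = 90 := rfl
  simp only [PySem.Chars.isupper, Bool.and_eq_true, decide_eq_true_eq, pv_chle, hA, hZ]
theorem pv_islower_iff (c : Char) : PySem.Chars.islower c = true ↔ 97 ≤ c.toNat ∧ c.toNat ≤ 122 := by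
  have ha : ('a':Char).toNat = 97 := rfl
  have hz : ('z':Char).toNat = 122 := rfl
  simp only [PySem.Chars.islower, Bool.and_eq_true, decide_eq_true_eq, pv_chle, ha, hz]
theorem pv_lower_toNat (c : Char) :
    (PySem.Chars.lowerChar c).toNat = if 65 ≤ c.toNat ∧ c.toNat ≤ 90 then c.toNat + 32 else c.toNat := by
  unfold PySem.Chars.lowerChar
  by_cases h : 65 ≤ c.toNat ∧ c.toNat ≤ 90
  · rw [if_pos ((pv_isupper_iff c).2 h), if_pos h, Char.toNat_ofNat, if_pos (by left; omega)]
  · rw [if_neg (by simp [pv_isupper_iff, h]), if_neg h]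
theorem pv_upper_toNat (c : Char) :
    (PySem.Chars.upperChar c).toNat = if 97 ≤ c.toNat ∧ c.toNat ≤ 122 then c.toNat - 32 else c.toNat := by
  unfold PySem.Chars.upperChar
  by_cases h : 97 ≤ c.toNat ∧ c.toNat ≤ 122
  · rw [if_pos ((pv_islower_iff c).2 h), if_pos h, Char.toNat_ofNat, if_pos (by left; omega)]
  · rw [if_neg (by simp [pv_islower_iff, h]), if_neg h]
theorem pv_upper_lower {c : Char} (h : PySem.Chars.isupper c = true) :
    PySem.Chars.upperChar (PySem.Chars.lowerChar c) = c := by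
  rw [pv_isupper_iff] at h
  apply pv_char_eq
  rw [pv_upper_toNat, pv_lower_toNat]
  split_ifs <;> omega
theorem pv_lower_lower (c : Char) :
    PySem.Chars.lowerChar (PySem.Chars.lowerChar c) = PySem.Chars.lowerChar c := by
  apply pv_char_eq
  rw [pv_lower_toNat, pv_lower_toNat]
  split_ifs <;> omega
theorem pv_lower_id {c : Char} (h : PySem.Chars.isupper c = false) :
    PySem.Chars.lowerChar c = c := by
  apply pv_char_eq
  have : ¬ (65 ≤ c.toNat ∧ c.toNat ≤ 90) := by
    intro hc; rw [← pv_isupper_iff] at hc; simp [h] at hc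
  rw [pv_lower_toNat, if_neg this]
theorem pv_upper_upper (b : Char) :
    PySem.Chars.upperChar (PySem.Chars.upperChar b) = PySem.Chars.upperChar b := by
  apply pv_char_eq
  rw [pv_upper_toNat, pv_upper_toNat]
  split_ifs <;> omega
theorem pv_lower_upper (b : Char) :
    PySem.Chars.lowerChar (PySem.Chars.upperChar b) = PySem.Chars.lowerChar b := by
  apply pv_char_eq
  rw [pv_lower_toNat (PySem.Chars.upperChar b), pv_upper_toNat, pv_lower_toNat b]
  split_ifs <;> omega
theorem pv_enumFold {σ : Type} (f : σ → String → String → σ) (pm : List String) (d : String) :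
    ∀ (al : List String) (n : ℕ) (init : σ), n + al.length ≤ pm.length →
      (PySem.List.enumerate al (n : ℤ)).foldl (fun s p => f s p.2 (PySem.List.pyGetD pm p.1 d)) init
        = (al.zip (pm.drop n)).foldl (fun s p => f s p.1 p.2) init := by
  intro al
  induction al with
  | nil => intro n init h; simp [PySem.List.enumerate]
  | cons a t ih =>
    intro n init h
    simp only [List.length_cons] at h
    have hn : n < pm.length := by omega
    rw [PySem.List.enumerate_cons]
    rw [List.drop_eq_getElem_cons hn]
    simp only [List.zip_cons_cons, List.foldl_cons]
    rw [PySem.List.pyGetD_eq_getElem pm d (by omega) (by exact_mod_cast hn)]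
    have h2 : ((n : ℤ) + 1) = ((n + 1 : ℕ) : ℤ) := by push_cast; ring
    rw [h2, ih (n + 1) _ (by omega)]
    simp
theorem pv_replace_go_single (x y : Char) :
    ∀ (l : List Char) (acc : List Char) (fuel : ℕ), l.length ≤ fuel →
      PySem.Chars.replace.go [x] [y] fuel l acc
        = acc.reverse ++ l.map (fun c => if c = x then y else c) := by
  intro l
  induction l with
  | nil =>
    intro acc fuel h
    cases fuel <;> simp [PySem.Chars.replace.go]
  | cons c t ih =>
    intro acc fuel h
    cases fuel with
    | zero => simp at h
    | succ fuel =>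
      rw [PySem.Chars.replace.go]
      by_cases hc : x = c
      · subst hc
        have hp : List.isPrefixOf [x] (x :: t) = true := by simp [List.isPrefixOf]
        rw [if_pos hp]
        simp only [List.length_singleton, List.drop_succ_cons, List.drop_zero, List.reverse_singleton]
        rw [ih _ fuel (by simpa using h)]
        simp
      · have hp : List.isPrefixOf [x] (c :: t) = false := by
          simp [List.isPrefixOf]
          exact hc
        rw [if_neg (by simp [hp])]
        rw [ih _ fuel (by simpa using h)]
        have : ¬ (c = x) := fun hx => hc hx.symm
        simp [this]
theorem pv_replace_single (s : List Char) (x y : Char) :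
    PySem.Chars.replace s [x] [y] = s.map (fun c => if c = x then y else c) := by
  unfold PySem.Chars.replace
  rw [if_neg (by simp)]
  exact pv_replace_go_single x y s [] s.length le_rfl
-- replace with an empty pattern and empty replacement is the identity
theorem pv_replace_empty (s : List Char) : PySem.Chars.replace s [] [] = s := by
  unfold PySem.Chars.replace
  simp [List.flatMap]
  induction s with
  | nil => rfl
  | cons c t ih => simp [ih]

theorem pv_replace_go_noop (old new : List Char) :
    ∀ (l acc : List Char) (fuel : ℕ), l.length ≤ fuel →
      (∀ t', t' <:+ l → ¬ old <+: t') →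
      PySem.Chars.replace.go old new fuel l acc = acc.reverse ++ l := by
  intro l
  induction l with
  | nil => intro acc fuel h hp; cases fuel <;> simp [PySem.Chars.replace.go]
  | cons c t ih =>
    intro acc fuel h hp
    cases fuel with
    | zero => simp at h
    | succ fuel =>
      rw [PySem.Chars.replace.go]
      rw [if_neg (by
        intro hpre
        exact hp (c :: t) (List.suffix_refl _) (List.isPrefixOf_iff_prefix.1 hpre))]
      rw [ih _ fuel (by simpa using h) (fun t' ht' => hp t' (ht'.trans (List.suffix_cons c t)))]
      simp

theorem pv_replace_no_infix (s old new : List Char) (hne : old ≠ [])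
    (h : ¬ old <:+: s) : PySem.Chars.replace s old new = s := by
  unfold PySem.Chars.replace
  rw [if_neg (by simpa using hne)]
  exact pv_replace_go_noop old new s [] s.length le_rfl
    (fun t' ht' hp => h (hp.isInfix.trans ht'.isInfix))

theorem pv_foldReplaceV (V : List Char) :
    ∀ (ps : List (String × String)) (s : List Char),
      (∀ c ∈ s, c ∈ V) →
      (∀ p ∈ ps, pvGoodPair V p) →
      (∀ p ∈ ps, p.1.toList.length = 1 → p.2.toList.length = 1 →
        PySem.Chars.upperChar (p.2.toList.headD ' ') ∈ V) →
      (ps.foldl (fun cp p => PySem.Str.replace cp p.1 (PySem.Str.upper p.2)) (String.ofList s)).toList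
        = s.map (pvSubstSeq ((pvRawPairs ps).map (fun q => (q.1, PySem.Chars.upperChar q.2)))) := by
  intro ps
  induction ps with
  | nil => intro s _ _ _; simp [pvRawPairs, pvSubstSeq, String.toList_ofList]
  | cons p t ih =>
    intro s hs hgood hins
    simp only [List.foldl_cons]
    by_cases hbs : pvSingleQ p = true
    · -- single/single pair: the replace is a per-char map
      simp only [pvSingleQ, Bool.and_eq_true, beq_iff_eq] at hbs
      obtain ⟨a, ha⟩ := List.length_eq_one_iff.1 hbs.1
      obtain ⟨b, hb⟩ := List.length_eq_one_iff.1 hbs.2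
      have hrep : PySem.Str.replace (String.ofList s) p.1 (PySem.Str.upper p.2)
          = String.ofList (s.map (fun c => if c = a then PySem.Chars.upperChar b else c)) := by
        unfold PySem.Str.replace
        rw [String.toList_ofList, ha, PySem.Str.toList_upper, hb]
        rw [show PySem.Chars.upper [b] = [PySem.Chars.upperChar b] from rfl]
        rw [pv_replace_single]
      rw [hrep, ih _ (by
          intro c' hc'
          obtain ⟨c, hc, hce⟩ := List.mem_map.1 hc'
          by_cases hca : c = a
          · rw [← hce, if_pos hca]
            have := hins p (by simp) hbs.1 hbs.2
            rwa [hb] at this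
          · rw [← hce, if_neg hca]; exact hs c hc)
        (fun q hq => hgood q (by simp [hq])) (fun q hq => hins q (by simp [hq]))]
      have hraw : pvRawPairs (p :: t) = (a, b) :: pvRawPairs t := by
        simp only [pvRawPairs]
        rw [List.filter_cons_of_pos (by simp [pvSingleQ, hbs.1, hbs.2]), List.map_cons, ha, hb]
        rfl
      rw [hraw, List.map_cons, List.map_map]
      apply List.map_congr_left
      intro c _
      simp [pvSubstSeq]
    · -- pair that can never fire
      have hfil : pvRawPairs (p :: t) = pvRawPairs t := by
        simp only [pvRawPairs]
        rw [List.filter_cons_of_neg (by simpa using hbs)]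
      have hnoop : PySem.Str.replace (String.ofList s) p.1 (PySem.Str.upper p.2)
          = String.ofList s := by
        rcases hgood p (by simp) with hsing | hin | hemp
        · exact absurd (by simp [pvSingleQ, hsing.1, hsing.2]) hbs
        · obtain ⟨c, hc, hcv⟩ := hin
          unfold PySem.Str.replace
          rw [String.toList_ofList, pv_replace_no_infix _ _ _
            (by intro hnil; rw [hnil] at hc; simp at hc)
            (by intro hinf; exact hcv (hs c (hinf.subset hc)))]
        · unfold PySem.Str.replace
          rw [String.toList_ofList, hemp.1, hemp.2]
          rw [show ("" : String).toList = [] from rfl]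
          rw [show PySem.Str.upper "" = "" from rfl]
          rw [show ("" : String).toList = [] from rfl, pv_replace_empty]
      rw [hnoop, hfil]
      exact ih s hs (fun q hq => hgood q (by simp [hq])) (fun q hq => hins q (by simp [hq]))

theorem pv_assoc_charsV (V : List Char) (x : Char) (hx : x ∈ V) :
    ∀ (ps : List (String × String)),
      (∀ p ∈ ps, pvGoodPair V p) →
      pvAssoc ps (String.ofList [x])
        = (pvLookup (pvRawPairs ps) x).map (fun b => String.ofList [b]) := by
  intro ps
  induction ps with
  | nil => intro _; rfl
  | cons p t ih =>
    intro h
    by_cases hbs : pvSingleQ p = true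
    · have hbs' := hbs
      simp only [pvSingleQ, Bool.and_eq_true, beq_iff_eq] at hbs'
      obtain ⟨a, ha⟩ := List.length_eq_one_iff.1 hbs'.1
      obtain ⟨b, hb⟩ := List.length_eq_one_iff.1 hbs'.2
      have hp1 : p.1 = String.ofList [a] := by rw [← String.ofList_toList (s := p.1), ha]
      have hp2 : p.2 = String.ofList [b] := by rw [← String.ofList_toList (s := p.2), hb]
      have hfil : pvRawPairs (p :: t) = (a, b) :: pvRawPairs t := by
        simp only [pvRawPairs]
        rw [List.filter_cons_of_pos hbs, List.map_cons, ha, hb]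
        rfl
      rw [hfil]
      unfold pvAssoc pvLookup
      by_cases hxa : x = a
      · rw [if_pos (by rw [hp1, hxa]), if_pos hxa, hp2]
        rfl
      · rw [if_neg (by
            intro he
            apply hxa
            have := congrArg String.toList he
            rw [String.toList_ofList, ha] at this
            exact (List.cons_eq_cons.1 this).1), if_neg hxa]
        exact ih (fun q hq => h q (by simp [hq]))
    · have hfil : pvRawPairs (p :: t) = pvRawPairs t := by
        rw [pvRawPairs, List.filter_cons_of_neg (by simpa using hbs), ← pvRawPairs]
      rw [hfil]
      unfold pvAssoc
      rw [if_neg (by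
        intro he
        rcases h p (by simp) with hsing | hin | hemp
        · exact hbs (by simp [pvSingleQ, hsing.1, hsing.2])
        · obtain ⟨c, hc, hcv⟩ := hin
          have := congrArg String.toList he
          rw [String.toList_ofList] at this
          rw [← this] at hc
          simp at hc
          rw [hc] at hcv
          exact hcv hx
        · have := congrArg String.toList he
          rw [String.toList_ofList, hemp.1] at this
          simp at this)]
      exact ih (fun q hq => h q (by simp [hq]))

theorem pv_substSeq_id {c : Char} :
    ∀ {ps : List (Char × Char)}, (∀ p ∈ ps, p.1 ≠ c) → pvSubstSeq ps c = c := by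
  intro ps
  induction ps with
  | nil => intro _; rfl
  | cons p t ih =>
    intro h
    unfold pvSubstSeq
    rw [if_neg (fun hc => h p (by simp) hc.symm)]
    exact ih (fun q hq => h q (by simp [hq]))
theorem pv_substSeq_eq_lookupS (S : List Char) (ps : List (Char × Char)) (c : Char)
    (h1 : ∀ p ∈ ps, p.1 ∉ S) (h2 : ∀ p ∈ ps, p.2 ∈ S) :
    pvSubstSeq ps c = (pvLookup ps c).getD c := by
  induction ps with
  | nil => rfl
  | cons p t ih =>
    unfold pvSubstSeq pvLookup
    by_cases hc : c = p.1
    · rw [if_pos hc, if_pos hc]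
      simp only [Option.getD_some]
      apply pv_substSeq_id
      intro q hq hqe
      exact h1 q (by simp [hq]) (hqe ▸ h2 p (by simp))
    · rw [if_neg hc, if_neg hc]
      exact ih (fun q hq => h1 q (by simp [hq])) (fun q hq => h2 q (by simp [hq]))

theorem pv_lookup_map_snd (h : Char → Char) (c : Char) :
    ∀ (ps : List (Char × Char)),
      pvLookup (ps.map (fun p => (p.1, h p.2))) c = (pvLookup ps c).map h := by
  intro ps
  induction ps with
  | nil => rfl
  | cons p t ih =>
    simp only [List.map_cons]
    unfold pvLookup
    split_ifs <;> simp [ih]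
theorem pv_dictFold (ps : List (String × String)) :
    ∀ (d : PySem.Dict String String) (k : String),
      (ps.foldl (fun d p => if d.contains p.1 then d else d.insert p.1 p.2) d).get? k
        = (d.get? k).or (pvAssoc ps k) := by
  induction ps with
  | nil => intro d k; simp [pvAssoc]
  | cons p t ih =>
    intro d k
    simp only [List.foldl_cons]
    unfold pvAssoc
    by_cases hc : (d.contains p.1) = true
    · rw [if_pos hc, ih]
      by_cases hk : k = p.1
      · subst hk
        have hne : d.get? p.1 ≠ none := fun hn => by
          rw [PySem.Dict.get?_eq_none_iff_contains d p.1] at hn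
          simp [hc] at hn
        obtain ⟨v, hv⟩ := Option.ne_none_iff_exists'.1 hne
        simp [hv]
      · rw [if_neg hk]
    · rw [if_neg hc, ih]
      by_cases hk : k = p.1
      · subst hk
        have hnone : d.get? p.1 = none := by
          rw [PySem.Dict.get?_eq_none_iff_contains d p.1]
          simpa using hc
        rw [PySem.Dict.get?_insert_self, hnone]
        simp
      · rw [PySem.Dict.get?_insert_of_ne _ _ hk, if_neg hk]
theorem pv_setLoop (q : ℤ → Bool) (g : ℤ → Char) :
    ∀ (n : ℕ) (t0 : List Char), n ≤ t0.length →
      (PySem.List.pyRange 0 (n : ℤ)).foldl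
          (fun t i => if q i then t.set i.toNat (g i) else t) t0
        = (List.range n).map (fun (j : ℕ) => if q (j : ℤ) then g (j : ℤ) else t0.getD j ' ')
            ++ t0.drop n := by
  intro n
  induction n with
  | zero => intro t0 h; simp [PySem.List.pyRange]
  | succ n ih =>
    intro t0 h
    have hcast : ((n + 1 : ℕ) : ℤ) = (n : ℤ) + 1 := by push_cast; ring
    rw [hcast, PySem.List.pyRange_one_succ_right (by positivity), List.foldl_append]
    rw [ih t0 (by omega)]
    have hn : n < t0.length := by omega
    simp only [List.foldl_cons, List.foldl_nil]
    have hlen : ((List.range n).map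
        (fun (j : ℕ) => if q (j : ℤ) then g (j : ℤ) else t0.getD j ' ')).length = n := by simp
    rw [List.range_succ, List.map_append, List.drop_eq_getElem_cons hn]
    by_cases hq : q (n : ℤ) = true
    · rw [if_pos hq]
      have htn : ((n : ℤ)).toNat = n := by simp
      rw [htn, List.set_append, if_neg (by rw [hlen]; omega), hlen]
      simp only [Nat.sub_self, List.set_cons_zero, List.map_singleton, if_pos hq]
      rw [List.append_assoc, List.singleton_append]
    · rw [if_neg (by simp [hq]), List.append_assoc]
      congr 1
      simp only [List.map_singleton, if_neg (by simp [hq] : ¬ q (n : ℤ) = true),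
        List.singleton_append]
      congr 1
      exact (List.getD_eq_getElem t0 ' ' hn).symm

-- ===== VERDICT (by name: the statement is the Claim_ definition above) =====
theorem permute_letters_spec : Claim_equal_permute_letters := by
  intro content alphabet permutation hdom hpre
  obtain ⟨hlen, hallB⟩ := hpre
  unfold Spec_permute_letters
  -- unpack the Bool-level Pre_ into Prop facts
  have hall : ∀ p ∈ alphabet.zip permutation,
      (pvSingleQ p = true ∧ p.1.toList.headD ' ' ∉ pvUS alphabet permutation)
      ∨ (∃ c ∈ p.1.toList, c ∉ pvW content ∧ c ∉ pvUS alphabet permutation)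
      ∨ (p.1 = "" ∧ p.2 = "") := by
    intro p hp
    have h2 := List.all_eq_true.1 hallB p hp
    simp at h2
    simp only [List.headD_eq_head?_getD]
    rcases h2 with (⟨hs, hn⟩ | ⟨x, hx1, hx2, hx3⟩) | he
    · exact Or.inl ⟨hs, hn⟩
    · exact Or.inr (Or.inl ⟨x, hx1, hx2, hx3⟩)
    · exact Or.inr (Or.inr he)
  have hGood : ∀ p ∈ alphabet.zip permutation,
      pvGoodPair (pvW content ++ pvUS alphabet permutation) p := by
    intro p hp
    rcases hall p hp with ⟨hs, _⟩ | ⟨c, hc, h1, h2⟩ | he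
    · left; simpa [pvSingleQ] using hs
    · right; left
      exact ⟨c, hc, by simp [List.mem_append, h1, h2]⟩
    · right; right; exact he
  have hins : ∀ p ∈ alphabet.zip permutation, p.1.toList.length = 1 → p.2.toList.length = 1 →
      PySem.Chars.upperChar (p.2.toList.headD ' ') ∈ pvW content ++ pvUS alphabet permutation := by
    intro p hp h1 h2
    apply List.mem_append_right
    apply List.mem_map.2
    refine ⟨(p.1.toList.headD ' ', p.2.toList.headD ' '), ?_, rfl⟩
    unfold pvPairs pvRawPairs
    exact List.mem_map.2 ⟨p, List.mem_filter.2 ⟨hp, by simp [pvSingleQ, h1, h2]⟩, rfl⟩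
  have hcasc : ∀ q ∈ pvPairs alphabet permutation, q.1 ∉ pvUS alphabet permutation := by
    intro q hq
    rw [pvPairs, pvRawPairs] at hq
    obtain ⟨p, hpmem, hpe⟩ := List.mem_map.1 hq
    have hp := List.mem_filter.1 hpmem
    have hsingle := hp.2
    simp only [pvSingleQ, Bool.and_eq_true, beq_iff_eq] at hsingle
    rcases hall p hp.1 with ⟨_, hno⟩ | ⟨c, hc, _, h2⟩ | he
    · rw [← hpe]; exact hno
    · obtain ⟨a, ha⟩ := List.length_eq_one_iff.1 hsingle.1
      rw [ha] at hc
      simp only [List.mem_singleton] at hc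
      have hq1 : q.1 = c := by rw [← hpe]; simp [ha, hc]
      rw [hq1]; exact h2
    · exfalso
      have := hsingle.1
      rw [he.1] at this
      simp at this
  have hsnd : ∀ r ∈ (pvPairs alphabet permutation).map
      (fun q => (q.1, PySem.Chars.upperChar q.2)), r.2 ∈ pvUS alphabet permutation := by
    intro r hr
    obtain ⟨q, hq, he⟩ := List.mem_map.1 hr
    rw [← he]
    exact List.mem_map.2 ⟨q, hq, rfl⟩
  have hfst : ∀ r ∈ (pvPairs alphabet permutation).map
      (fun q => (q.1, PySem.Chars.upperChar q.2)), r.1 ∉ pvUS alphabet permutation := by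
    intro r hr
    obtain ⟨q, hq, he⟩ := List.mem_map.1 hr
    rw [← he]
    exact hcasc q hq
  have hsub : ∀ x : Char,
      pvSubstSeq ((pvPairs alphabet permutation).map (fun q => (q.1, PySem.Chars.upperChar q.2))) x
        = ((pvLookup (pvPairs alphabet permutation) x).map PySem.Chars.upperChar).getD x := by
    intro x
    rw [pv_substSeq_eq_lookupS (pvUS alphabet permutation) _ x hfst hsnd, pv_lookup_map_snd]
  -- ===== B side =====
  have hB : permute_letters_alt content alphabet permutation
      = String.ofList (content.toList.map (pvPhi alphabet permutation)) := by
    unfold permute_letters_alt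
    dsimp only []
    have e0 : (PySem.List.enumerate alphabet : List (ℤ × String))
        = PySem.List.enumerate alphabet ((0:ℕ):ℤ) := by norm_num
    rw [e0, pv_enumFold (fun d letter target => if d.contains letter then d else d.insert letter target)
      permutation "" alphabet 0 PySem.Dict.empty (by simpa using hlen), List.drop_zero]
    apply congrArg String.ofList
    refine (PySem.List.foldl_congr_mem content.toList _
        (fun acc c => acc ++ [pvPhi alphabet permutation c]) [] ?_).trans ?_
    case refine_2 => rw [PySem.List.foldl_append_singleton_eq_map, List.nil_append]
    intro acc c hc
    simp only []
    rw [pv_dictFold, PySem.Dict.get?_empty, Option.none_or]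
    have hx : PySem.Chars.lowerChar c ∈ pvW content ++ pvUS alphabet permutation := by
      apply List.mem_append_left
      show PySem.Chars.lowerChar c ∈ PySem.Chars.lower content.toList
      exact List.mem_map.2 ⟨c, hc, rfl⟩
    rw [pv_assoc_charsV _ _ hx _ hGood]
    rw [show pvRawPairs (alphabet.zip permutation) = pvPairs alphabet permutation from rfl]
    unfold pvPhi
    cases hlk : pvLookup (pvPairs alphabet permutation) (PySem.Chars.lowerChar c) with
    | none => simp
    | some b =>
      simp only [Option.map_some]
      by_cases hcu : PySem.Chars.isupper c = true
      · simp [hcu, PySem.Str.toList_upper, PySem.Chars.upper, String.toList_ofList]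
      · simp [hcu, PySem.Str.toList_lower, PySem.Chars.lower, String.toList_ofList]
  -- ===== A side =====
  have hA : permute_letters content alphabet permutation
      = String.ofList (content.toList.map (pvPhi alphabet permutation)) := by
    unfold permute_letters
    dsimp only []
    have e0 : (PySem.List.enumerate alphabet : List (ℤ × String))
        = PySem.List.enumerate alphabet ((0:ℕ):ℤ) := by norm_num
    rw [e0, pv_enumFold (fun cp letter rep => PySem.Str.replace cp letter rep)
      (permutation.map PySem.Str.upper) "" alphabet 0 (PySem.Str.lower content)
      (by simpa using hlen), List.drop_zero, List.zip_map_right, List.foldl_map]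
    simp only [Prod.map_fst, Prod.map_snd, id_eq]
    have hinit : PySem.Str.lower content = String.ofList (pvW content) := rfl
    rw [hinit]
    have hM := pv_foldReplaceV (pvW content ++ pvUS alphabet permutation)
      (alphabet.zip permutation) (pvW content)
      (fun c hc => List.mem_append_left _ hc) hGood hins
    have hMstr : (alphabet.zip permutation).foldl
          (fun cp p => PySem.Str.replace cp p.1 (PySem.Str.upper p.2))
          (String.ofList (pvW content))
        = String.ofList ((pvW content).map (pvSubstSeq ((pvRawPairs (alphabet.zip permutation)).map
            (fun q => (q.1, PySem.Chars.upperChar q.2))))) := by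
      rw [← String.ofList_toList (s := (alphabet.zip permutation).foldl
        (fun cp p => PySem.Str.replace cp p.1 (PySem.Str.upper p.2)) (String.ofList (pvW content))), hM]
    rw [hMstr]
    rw [show pvRawPairs (alphabet.zip permutation) = pvPairs alphabet permutation from rfl]
    apply congrArg String.ofList
    set Mlist := (pvW content).map (pvSubstSeq ((pvPairs alphabet permutation).map
      (fun q => (q.1, PySem.Chars.upperChar q.2)))) with hMdef
    have hMlen : Mlist.length = content.toList.length := by
      rw [hMdef]; simp [pvW, PySem.Chars.lower]
    rw [PySem.Str.len_eq, String.toList_ofList]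
    have ht0 : (PySem.Str.lower (String.ofList Mlist)).toList = Mlist.map PySem.Chars.lowerChar := by
      rw [PySem.Str.toList_lower, String.toList_ofList]; rfl
    rw [ht0]
    rw [pv_setLoop (fun i => PySem.Chars.isupper (PySem.List.pyGetD content.toList i ' '))
      (fun i => PySem.Chars.upperChar (PySem.List.pyGetD Mlist i ' '))
      Mlist.length (Mlist.map PySem.Chars.lowerChar) (by simp)]
    rw [List.drop_of_length_le (by simp), List.append_nil]
    apply List.ext_getElem
    · simp [hMlen]
    · intro j hj1 hj2
      have hjM : j < Mlist.length := by simpa using hj1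
      have hjL : j < content.toList.length := by omega
      simp only [List.getElem_map, List.getElem_range]
      rw [PySem.List.pyGetD_eq_getElem content.toList ' ' (by positivity) (by exact_mod_cast hjL)]
      rw [PySem.List.pyGetD_eq_getElem Mlist ' ' (by positivity) (by exact_mod_cast hjM)]
      simp only [Int.toNat_natCast]
      have hMj : Mlist[j] = pvSubstSeq ((pvPairs alphabet permutation).map
          (fun q => (q.1, PySem.Chars.upperChar q.2)))
          (PySem.Chars.lowerChar content.toList[j]) := by
        simp [hMdef, pvW, PySem.Chars.lower]
      have hgd : (Mlist.map PySem.Chars.lowerChar).getD j ' ' = PySem.Chars.lowerChar Mlist[j] := by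
        rw [List.getD_eq_getElem _ ' ' (by simpa using hjM)]
        simp
      rw [hgd, hMj, hsub]
      unfold pvPhi
      cases hlk : pvLookup (pvPairs alphabet permutation)
          (PySem.Chars.lowerChar content.toList[j]) with
      | none =>
        simp only [Option.map_none, Option.getD_none]
        by_cases hc : PySem.Chars.isupper content.toList[j] = true
        · rw [if_pos hc, pv_upper_lower hc]
        · rw [if_neg hc, pv_lower_lower, pv_lower_id (by simpa using hc)]
      | some b =>
        simp only [Option.map_some, Option.getD_some]
        by_cases hc : PySem.Chars.isupper content.toList[j] = true
        · rw [if_pos hc, pv_upper_upper, if_pos hc]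
        · rw [if_neg hc, pv_lower_upper, if_neg hc]
  rw [hA, hB]
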